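-- pv_equiv track=rewrite | github.com/pipelineservices/klynxai-assistant | backend/app.py | _pick_sources
-- ===== SOURCE A (Python) =====
-- from typing import Any, Dict, List
--
-- def _pick_sources(results: List[Dict[str, str]]) -> List[Dict[str, str]]:
--     def score(url: str) -> int:
--         u = (url or "").lower()
--         if "aws.amazon.com" in u or "docs.aws.amazon.com" in u:
--             return 3
--         if "youtube.com" in u or "youtu.be" in u:
--             return 2
--         return 1
--
--     ranked = sorted(results, key=lambda r: score(r.get("url", "")), reverse=True)
--     uniq = []
--     seen = set()
--     for r in ranked:
--         url = r.get("url", "")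
--         if not url or url in seen:
--             continue
--         seen.add(url)
--         uniq.append(r)
--         if len(uniq) >= 6:
--             break
--     return uniq
-- ===== SOURCE B (Python) =====
-- from typing import Dict, List
--
-- def _pick_sources(results: List[Dict[str, str]]) -> List[Dict[str, str]]:
--     # 3-bucket stable counting "sort" by score (scores are only 3/2/1), then dedup, take 6.
--     aws, yt, rest = [], [], []
--     for r in results:
--         u = (r.get("url", "") or "").lower()
--         if "aws.amazon.com" in u:
--             aws.append(r)
--         elif "youtube.com" in u or "youtu.be" in u:
--             yt.append(r)
--         else:
--             rest.append(r)
--     uniq = []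
--     seen = set()
--     for r in aws + yt + rest:
--         url = r.get("url", "")
--         if not url or url in seen:
--             continue
--         seen.add(url)
--         uniq.append(r)
--         if len(uniq) >= 6:
--             break
--     return uniq
-- ===== Notes on version B (the rewrite author's own statement) =====
-- stated objective: alternative
-- what changed: Replaces the comparison sort by score with a single-pass 3-bucket stable counting sort (scores can only be 3/2/1), then the same dedup-and-take-6 scan; intended as linear-time, measured only ~1.4x at the largest size.
import Mathlib
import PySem

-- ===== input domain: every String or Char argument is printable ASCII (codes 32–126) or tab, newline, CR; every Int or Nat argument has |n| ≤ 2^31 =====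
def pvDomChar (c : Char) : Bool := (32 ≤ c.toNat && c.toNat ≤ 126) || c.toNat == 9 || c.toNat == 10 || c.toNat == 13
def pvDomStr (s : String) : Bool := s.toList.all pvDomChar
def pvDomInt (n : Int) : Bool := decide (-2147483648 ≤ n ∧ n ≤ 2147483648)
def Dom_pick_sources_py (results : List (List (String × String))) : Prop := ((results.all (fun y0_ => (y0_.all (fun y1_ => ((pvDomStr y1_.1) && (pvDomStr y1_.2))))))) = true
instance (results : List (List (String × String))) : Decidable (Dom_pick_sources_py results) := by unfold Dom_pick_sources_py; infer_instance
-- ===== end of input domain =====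

-- B replaces A's comparison sort by score with a one-pass 3-bucket stable counting sort (only 3 score values exist); same dedup-take-6 scan afterwards. Objective: alternative algorithm.

-- ===== PORT A =====
-- score(url); '(url or "")' is 'url' itself for every string (only "" is falsy and 'or' then yields "")
def scoreA (url : String) : Int :=
  let u := PySem.Str.lower url
  if PySem.Str.isIn "aws.amazon.com" u || PySem.Str.isIn "docs.aws.amazon.com" u then 3
  else if PySem.Str.isIn "youtube.com" u || PySem.Str.isIn "youtu.be" u then 2
  else 1

-- the 'for r in ranked: … break' loop, state (uniq, seen)
def pickLoopA : List (List (String × String)) → List (List (String × String)) → PySem.Set String → List (List (String × String))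
  | [], uniq, _ => uniq
  | r :: rest, uniq, seen =>
    let url := PySem.Dict.getD (PySem.Dict.mk r) "url" ""
    if url = "" || PySem.Set.contains seen url then pickLoopA rest uniq seen
    else
      let uniq' := uniq ++ [r]
      if 6 ≤ uniq'.length then uniq'
      else pickLoopA rest uniq' (PySem.Set.add seen url)

def pick_sources_py (results : List (List (String × String))) : List (List (String × String)) :=
  let ranked := PySem.List.sorted results (fun r => scoreA (PySem.Dict.getD (PySem.Dict.mk r) "url" "")) true
  pickLoopA ranked [] PySem.Set.empty

-- ===== PORT B =====
-- one pass: append each r to its score bucket (aws, yt, rest)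
def bucketsB (results : List (List (String × String))) :
    List (List (String × String)) × List (List (String × String)) × List (List (String × String)) :=
  results.foldl (fun b r =>
    let u := PySem.Str.lower (PySem.Dict.getD (PySem.Dict.mk r) "url" "")
    if PySem.Str.isIn "aws.amazon.com" u then (b.1 ++ [r], b.2.1, b.2.2)
    else if PySem.Str.isIn "youtube.com" u || PySem.Str.isIn "youtu.be" u then (b.1, b.2.1 ++ [r], b.2.2)
    else (b.1, b.2.1, b.2.2 ++ [r])) ([], [], [])

-- B's 'for r in aws + yt + rest: … break' loop, state (uniq, seen)
def pickLoopB : List (List (String × String)) → List (List (String × String)) → PySem.Set String → List (List (String × String))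
  | [], uniq, _ => uniq
  | r :: rest, uniq, seen =>
    let url := PySem.Dict.getD (PySem.Dict.mk r) "url" ""
    if url = "" || PySem.Set.contains seen url then pickLoopB rest uniq seen
    else
      let uniq' := uniq ++ [r]
      if 6 ≤ uniq'.length then uniq'
      else pickLoopB rest uniq' (PySem.Set.add seen url)

def pick_sources_py_alt (results : List (List (String × String))) : List (List (String × String)) :=
  let b := bucketsB results
  pickLoopB (b.1 ++ b.2.1 ++ b.2.2) [] PySem.Set.empty

-- ===== PRECONDITION & SPEC =====
def Spec_pick_sources_py (results : List (List (String × String))) (out : List (List (String × String))) : Prop := out = pick_sources_py_alt results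
instance (results : List (List (String × String))) (out : List (List (String × String))) : Decidable (Spec_pick_sources_py results out) := by unfold Spec_pick_sources_py; infer_instance

-- ===== CLAIM (what is proved, stated in full; the proofs are below) =====
def Claim_equal_pick_sources_py : Prop := ∀ (results : List (List (String × String))), Dom_pick_sources_py results → Spec_pick_sources_py results (pick_sources_py results)

-- ===== LEMMAS AND PROOFS =====

-- the key A sorts by
def keyA (r : List (String × String)) : Int := scoreA (PySem.Dict.getD (PySem.Dict.mk r) "url" "")
-- B's bucket tests, as Bool predicates on r
def condAws (r : List (String × String)) : Bool :=
  PySem.Str.isIn "aws.amazon.com" (PySem.Str.lower (PySem.Dict.getD (PySem.Dict.mk r) "url" ""))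
def condYt (r : List (String × String)) : Bool :=
  PySem.Str.isIn "youtube.com" (PySem.Str.lower (PySem.Dict.getD (PySem.Dict.mk r) "url" "")) ||
  PySem.Str.isIn "youtu.be" (PySem.Str.lower (PySem.Dict.getD (PySem.Dict.mk r) "url" ""))

-- "docs.aws.amazon.com" in u implies "aws.amazon.com" in u, so A's first test is exactly condAws
lemma isIn_docs_imp (u : String) (h : PySem.Str.isIn "docs.aws.amazon.com" u = true) :
    PySem.Str.isIn "aws.amazon.com" u = true := by
  rw [PySem.Str.isIn_iff_infix] at h ⊢
  exact List.IsInfix.trans (by decide : ("aws.amazon.com".toList <:+: "docs.aws.amazon.com".toList)) h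

lemma keyA_eq (r : List (String × String)) :
    keyA r = if condAws r then 3 else if condYt r then 2 else 1 := by
  have hfun : keyA r =
      (if (condAws r || PySem.Str.isIn "docs.aws.amazon.com"
            (PySem.Str.lower (PySem.Dict.getD (PySem.Dict.mk r) "url" ""))) then (3 : Int)
       else if condYt r then 2 else 1) := rfl
  rw [hfun]
  cases hc : condAws r with
  | true => rfl
  | false =>
    cases hd : PySem.Str.isIn "docs.aws.amazon.com"
        (PySem.Str.lower (PySem.Dict.getD (PySem.Dict.mk r) "url" "")) with
    | false => rfl
    | true => exact absurd (isIn_docs_imp _ hd) (by simpa [condAws] using hc)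

lemma keyA_aws {r : List (String × String)} (h : condAws r = true) : keyA r = 3 := by
  rw [keyA_eq, h]; rfl
lemma keyA_yt {r : List (String × String)} (h : condAws r = false) (h2 : condYt r = true) : keyA r = 2 := by
  rw [keyA_eq, h, h2]; rfl
lemma keyA_rest {r : List (String × String)} (h : condAws r = false) (h2 : condYt r = false) : keyA r = 1 := by
  rw [keyA_eq, h, h2]; rfl

-- insertBy across a split: skip l1, insert before l2
lemma insertBy_append {α : Type} (before : α → α → Bool) (x : α) (l1 l2 : List α)
    (h1 : ∀ y ∈ l1, before x y = false) (h2 : ∀ y ∈ l2, before x y = true) :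
    PySem.List.insertBy before x (l1 ++ l2) = l1 ++ x :: l2 := by
  induction l1 with
  | nil =>
    cases l2 with
    | nil => rfl
    | cons y ys => simp [PySem.List.insertBy, h2 y (by simp)]
  | cons a l1 ih =>
    have ha := h1 a (by simp)
    simp [PySem.List.insertBy, ha, ih (fun y hy => h1 y (by simp [hy]))]

-- A's insertion sort (reverse, key ∈ {1,2,3}) produces exactly the three stable buckets
lemma foldl_insertBy_buckets (xs a3 a2 a1 : List (List (String × String)))
    (h3 : ∀ y ∈ a3, keyA y = 3) (h2 : ∀ y ∈ a2, keyA y = 2) (h1 : ∀ y ∈ a1, keyA y = 1) :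
    xs.foldl (fun acc x => PySem.List.insertBy (fun a b => decide (keyA b < keyA a)) x acc) (a3 ++ a2 ++ a1)
      = (a3 ++ xs.filter condAws) ++ (a2 ++ xs.filter (fun r => !condAws r && condYt r))
        ++ (a1 ++ xs.filter (fun r => !condAws r && !condYt r)) := by
  induction xs generalizing a3 a2 a1 with
  | nil => simp
  | cons x xs ih =>
    simp only [List.foldl_cons, List.filter_cons]
    by_cases hx : condAws x = true
    · have hk : keyA x = 3 := keyA_aws hx
      have hins : PySem.List.insertBy (fun a b => decide (keyA b < keyA a)) x (a3 ++ a2 ++ a1)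
          = (a3 ++ [x]) ++ a2 ++ a1 := by
        rw [List.append_assoc, insertBy_append _ _ a3 (a2 ++ a1)
          (fun y hy => by simp [hk, h3 y hy])
          (fun y hy => by
            rcases List.mem_append.mp hy with h | h
            · simp [hk, h2 y h]
            · simp [hk, h1 y h])]
        simp
      rw [hins, ih (a3 ++ [x]) a2 a1
        (fun y hy => by rcases List.mem_append.mp hy with h | h
                        · exact h3 y h
                        · simp at h; simpa [h] using hk)
        h2 h1]
      simp [hx]
    · replace hx : condAws x = false := by simpa using hx
      by_cases hy' : condYt x = true
      · have hk : keyA x = 2 := keyA_yt hx hy'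
        have hins : PySem.List.insertBy (fun a b => decide (keyA b < keyA a)) x (a3 ++ a2 ++ a1)
            = a3 ++ (a2 ++ [x]) ++ a1 := by
          rw [insertBy_append _ _ (a3 ++ a2) a1
            (fun y hy => by
              rcases List.mem_append.mp hy with h | h
              · simp [hk, h3 y h]
              · simp [hk, h2 y h])
            (fun y hy => by simp [hk, h1 y hy])]
          simp
        rw [hins, ih a3 (a2 ++ [x]) a1 h3
          (fun y hy => by rcases List.mem_append.mp hy with h | h
                          · exact h2 y h
                          · simp at h; simpa [h] using hk)
          h1]
        simp [hx, hy']
      · replace hy' : condYt x = false := by simpa using hy'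
        have hk : keyA x = 1 := keyA_rest hx hy'
        have hins : PySem.List.insertBy (fun a b => decide (keyA b < keyA a)) x (a3 ++ a2 ++ a1)
            = a3 ++ a2 ++ (a1 ++ [x]) := by
          have h := insertBy_append (fun a b => decide (keyA b < keyA a)) x (a3 ++ a2 ++ a1) []
            (fun y hy => by
              rcases List.mem_append.mp hy with h | h
              · rcases List.mem_append.mp h with h' | h'
                · simp [hk, h3 y h']
                · simp [hk, h2 y h']
              · simp [hk, h1 y h])
            (by simp)
          simpa [List.append_assoc] using h
        rw [hins, ih a3 a2 (a1 ++ [x]) h3 h2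
          (fun y hy => by rcases List.mem_append.mp hy with h | h
                          · exact h1 y h
                          · simp at h; simpa [h] using hk)]
        simp [hx, hy']

-- B's bucket fold computes the three filters
lemma foldl_buckets_aux (xs a3 a2 a1 : List (List (String × String))) :
    xs.foldl (fun b r =>
        if condAws r then (b.1 ++ [r], b.2.1, b.2.2)
        else if condYt r then (b.1, b.2.1 ++ [r], b.2.2)
        else (b.1, b.2.1, b.2.2 ++ [r])) (a3, a2, a1)
      = (a3 ++ xs.filter condAws, a2 ++ xs.filter (fun r => !condAws r && condYt r),
         a1 ++ xs.filter (fun r => !condAws r && !condYt r)) := by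
  induction xs generalizing a3 a2 a1 with
  | nil => simp
  | cons x xs ih =>
    simp only [List.foldl_cons, List.filter_cons]
    by_cases hx : condAws x = true
    · rw [if_pos hx, ih]
      simp [hx]
    · replace hx : condAws x = false := by simpa using hx
      by_cases hy' : condYt x = true
      · rw [if_neg (by simp [hx]), if_pos hy', ih]
        simp [hx, hy']
      · replace hy' : condYt x = false := by simpa using hy'
        rw [if_neg (by simp [hx]), if_neg (by simp [hy']), ih]
        simp [hx, hy']

lemma bucketsB_eq (xs : List (List (String × String))) :
    bucketsB xs = (xs.filter condAws, xs.filter (fun r => !condAws r && condYt r),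
                   xs.filter (fun r => !condAws r && !condYt r)) := by
  have hfun : bucketsB xs = xs.foldl (fun b r =>
      if condAws r then (b.1 ++ [r], b.2.1, b.2.2)
      else if condYt r then (b.1, b.2.1 ++ [r], b.2.2)
      else (b.1, b.2.1, b.2.2 ++ [r])) ([], [], []) := rfl
  rw [hfun, foldl_buckets_aux]
  simp

-- the two dedup loops are the same computation
lemma pickLoop_eq (l uniq : List (List (String × String))) (seen : PySem.Set String) :
    pickLoopA l uniq seen = pickLoopB l uniq seen := by
  induction l generalizing uniq seen with
  | nil => rfl
  | cons r rest ih =>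
    simp only [pickLoopA, pickLoopB]
    split_ifs <;> simp [ih]

-- ===== VERDICT (by name: the statement is the Claim_ definition above) =====
theorem pick_sources_py_spec : Claim_equal_pick_sources_py := by
  intro results _
  show pick_sources_py results = pick_sources_py_alt results
  show pickLoopA (PySem.List.sorted results
      (fun r => scoreA (PySem.Dict.getD (PySem.Dict.mk r) "url" "")) true) [] PySem.Set.empty
    = pickLoopB ((bucketsB results).1 ++ (bucketsB results).2.1 ++ (bucketsB results).2.2) [] PySem.Set.empty
  rw [bucketsB_eq, pickLoop_eq,
    show (fun r => scoreA (PySem.Dict.getD (PySem.Dict.mk r) "url" "")) = keyA from rfl,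
    PySem.List.sorted_rev_eq_foldl_insertBy]
  have h := foldl_insertBy_buckets results [] [] [] (by simp) (by simp) (by simp)
  rw [show List.foldl (fun acc x => PySem.List.insertBy (fun a b => decide (keyA b < keyA a)) x acc) [] results
      = List.filter condAws results ++ (List.filter (fun r => !condAws r && condYt r) results
        ++ List.filter (fun r => !condAws r && !condYt r) results)
    from by simpa [List.append_assoc] using h]
  simp [List.append_assoc]
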